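-- pv_equiv track=rewrite | github.com/SalihOmerOngun/Python-ile-programlama | lab3_salih_omer_ongun_200102002003.py | problem9
-- ===== SOURCE A (Python) =====
-- def problem9(row,column):
--     if row==1 and column==1:
--         return 1
--     elif row!=1 and column==1:
--         return 3
--     elif row==column and row>1:
--         return 2
--     elif row!=column and column>1:
--         return problem9(row-1,column-1) + problem9(row-1,column)
-- ===== SOURCE B (Python) =====
-- def problem9(row, column):
--     # Bottom-up DP over rows instead of exponential two-branch recursion.
--     if column == 1:
--         return 1 if row == 1 else 3
--     if row == column:
--         return 2
--     prev = [1]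
--     for _ in range(2, row + 1):
--         prev = [3] + [prev[i] + prev[i + 1] for i in range(len(prev) - 1)] + [2]
--     return prev[column - 1]
-- ===== Notes on version B (the rewrite author's own statement) =====
-- stated objective: faster
-- what changed: Replaces A's exponential two-branch recursion with a bottom-up DP that rebuilds each Pascal-like row once and indexes the final row.
-- outside the precondition, e.g. on problem9(3, 0): A returns None, B returns 2
import Mathlib
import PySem

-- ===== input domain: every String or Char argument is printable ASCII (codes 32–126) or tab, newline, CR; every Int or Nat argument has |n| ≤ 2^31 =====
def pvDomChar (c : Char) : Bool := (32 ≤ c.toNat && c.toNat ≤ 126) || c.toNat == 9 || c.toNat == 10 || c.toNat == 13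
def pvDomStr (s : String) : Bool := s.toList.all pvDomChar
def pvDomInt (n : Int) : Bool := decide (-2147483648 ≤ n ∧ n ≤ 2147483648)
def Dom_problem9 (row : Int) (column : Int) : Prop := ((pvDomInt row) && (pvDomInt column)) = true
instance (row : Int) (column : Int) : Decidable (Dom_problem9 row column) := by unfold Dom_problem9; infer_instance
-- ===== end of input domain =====

-- B replaces A's exponential two-branch recursion by a bottom-up DP that rebuilds each row once (asymptotically faster).

-- ===== PORT A =====
-- Literal transliteration of A's recursion; fuel makes it total in Lean (inside
-- Pre_problem9 the recursion depth is below row.toNat + 1, so the fuel branch is never hit there).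
def problem9Go : Nat → Int → Int → Int
  | 0, _, _ => 0
  | fuel+1, row, column =>
    if row = 1 ∧ column = 1 then 1
    else if row ≠ 1 ∧ column = 1 then 3
    else if row = column ∧ row > 1 then 2
    else if row ≠ column ∧ column > 1 then
      problem9Go fuel (row-1) (column-1) + problem9Go fuel (row-1) column
    else 0  -- Python falls through and returns None here; outside Pre_problem9

def problem9 (row : Int) (column : Int) : Int := problem9Go (row.toNat + 1) row column

-- ===== PORT B =====
-- one DP step: from row r's list [values at columns 1..r] to row (r+1)'s list
def rowStep (prev : List Int) : List Int :=
  [3] ++ (List.range (prev.length - 1)).map (fun i => prev.getD i 0 + prev.getD (i + 1) 0) ++ [2]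

def problem9_alt (row : Int) (column : Int) : Int :=
  if column = 1 then (if row = 1 then 1 else 3)
  else if row = column then 2
  else
    let prev := (PySem.List.pyRange 2 (row + 1) 1).foldl (fun p _ => rowStep p) [1]
    (PySem.List.pyGet? prev (column - 1)).getD 0

-- ===== PRECONDITION & SPEC =====
-- Pre_ excludes exactly the inputs where the Python A does not return an int:
-- column < 1 (or row = column ≤ 1 with column ≠ 1) falls off the elif chain (None),
-- and row < column with column > 1 recurses forever (RecursionError).
def Pre_problem9 (row : Int) (column : Int) : Prop :=
  column = 1 ∨ (2 ≤ column ∧ column ≤ row)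
instance (row : Int) (column : Int) : Decidable (Pre_problem9 row column) := by
  unfold Pre_problem9; infer_instance
def pvWitness_problem9 : Int × Int := (5, 3)

def Spec_problem9 (row : Int) (column : Int) (out : Int) : Prop := out = problem9_alt row column
instance (row : Int) (column : Int) (out : Int) : Decidable (Spec_problem9 row column out) := by unfold Spec_problem9; infer_instance

-- ===== CLAIM (what is proved, stated in full; the proofs are below) =====
def Claim_equal_problem9 : Prop := ∀ (row : Int) (column : Int), Dom_problem9 row column → Pre_problem9 row column → Spec_problem9 row column (problem9 row column)

-- ===== LEMMAS AND PROOFS =====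

theorem length_rowStep (prev : List Int) (h : 1 ≤ prev.length) :
    (rowStep prev).length = prev.length + 1 := by
  simp [rowStep]; omega

theorem length_rows (n : Nat) : (rowStep^[n] ([1] : List Int)).length = n + 1 := by
  induction n with
  | zero => simp
  | succ n ih =>
    rw [Function.iterate_succ_apply', length_rowStep _ (by omega), ih]

theorem rowStep_getD_zero (prev : List Int) : (rowStep prev).getD 0 0 = 3 := by
  simp [rowStep]

theorem rowStep_getD_last (prev : List Int) (h : 1 ≤ prev.length) :
    (rowStep prev).getD prev.length 0 = 2 := by
  have hlen : ((3 : Int) :: (List.range (prev.length - 1)).map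
      (fun i => prev.getD i 0 + prev.getD (i + 1) 0)).length = prev.length := by
    simp; omega
  have : rowStep prev = ((3 : Int) :: (List.range (prev.length - 1)).map
      (fun i => prev.getD i 0 + prev.getD (i + 1) 0)) ++ [2] := by
    simp [rowStep]
  rw [this, List.getD_eq_getElem?_getD, List.getElem?_append_right (by omega), hlen]
  simp

theorem rowStep_getD_mid (prev : List Int) (j : Nat) (h1 : 1 ≤ j) (h2 : j ≤ prev.length - 1) :
    (rowStep prev).getD j 0 = prev.getD (j - 1) 0 + prev.getD j 0 := by
  have hj : j - 1 < ((List.range (prev.length - 1)).map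
      (fun i => prev.getD i 0 + prev.getD (i + 1) 0)).length := by simp; omega
  have hstep : rowStep prev = (3 : Int) :: (((List.range (prev.length - 1)).map
      (fun i => prev.getD i 0 + prev.getD (i + 1) 0)) ++ [2]) := by
    simp [rowStep]
  rw [hstep]
  have hj' : j = (j - 1) + 1 := by omega
  rw [hj', List.getD_cons_succ, List.getD_eq_getElem?_getD,
      List.getElem?_append_left hj]
  have : (j - 1) + 1 = j := by omega
  simp [List.getElem?_map, List.getElem?_range (by simpa using hj), this]

-- the fuel-based port computes row entries of the DP table whenever fuel ≥ row
theorem goEq : ∀ (n : Nat) (c : Nat) (fuel : Nat), 1 ≤ c → c ≤ n + 1 → n + 1 ≤ fuel →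
    problem9Go fuel ((n : Int) + 1) (c : Int) = (rowStep^[n] ([1] : List Int)).getD (c - 1) 0 := by
  intro n
  induction n with
  | zero =>
    intro c fuel hc1 hc2 hfuel
    obtain ⟨f, rfl⟩ : ∃ f, fuel = f + 1 := ⟨fuel - 1, by omega⟩
    have : c = 1 := by omega
    subst this
    simp [problem9Go]
  | succ n ih =>
    intro c fuel hc1 hc2 hfuel
    obtain ⟨f, rfl⟩ : ∃ f, fuel = f + 1 := ⟨fuel - 1, by omega⟩
    have hrow : ((n : Int) + 1 + 1) ≠ 1 := by omega
    rw [Function.iterate_succ_apply']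
    by_cases hc : c = 1
    · subst hc
      simp only [problem9Go]
      rw [if_neg (by push_cast; omega), if_pos ⟨by omega, rfl⟩]
      exact (rowStep_getD_zero _).symm
    · by_cases hce : c = n + 2
      · subst hce
        simp only [problem9Go]
        rw [if_neg (by push_cast; omega), if_neg (by push_cast; omega),
            if_pos ⟨by push_cast; omega, by omega⟩]
        have := rowStep_getD_last (rowStep^[n] ([1] : List Int)) (by rw [length_rows]; omega)
        rw [length_rows] at this
        simpa using this.symm
      · -- interior: 2 ≤ c ≤ n + 1
        have hc2' : c ≤ n + 1 := by omega
        have hcc : 2 ≤ c := by omega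
        simp only [problem9Go]
        rw [if_neg (by push_cast; omega), if_neg (by push_cast; omega),
            if_neg (by push_cast; omega), if_pos ⟨by push_cast; omega, by push_cast; omega⟩]
        have e1 : (((n + 1 : Nat) : Int) + 1) - 1 = ((n : Int) + 1) := by push_cast; ring
        have e2 : ((c : Int)) - 1 = ((c - 1 : Nat) : Int) := by omega
        rw [e1, e2, ih (c - 1) f (by omega) (by omega) (by omega),
            ih c f (by omega) (by omega) (by omega)]
        have := rowStep_getD_mid (rowStep^[n] ([1] : List Int)) (c - 1) (by omega)
          (by rw [length_rows]; omega)
        rw [this]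

theorem foldl_const_rowStep : ∀ (l : List Int) (init : List Int),
    l.foldl (fun p _ => rowStep p) init = rowStep^[l.length] init := by
  intro l
  induction l with
  | nil => intro init; simp
  | cons x xs ih =>
    intro init
    simp [List.foldl_cons, ih, Function.iterate_succ_apply]

-- ===== VERDICT (by name: the statement is the Claim_ definition above) =====
theorem problem9_spec : Claim_equal_problem9 := by
  intro row column _ hpre
  unfold Spec_problem9
  rcases hpre with h1 | ⟨h2, h3⟩
  · -- column = 1
    subst h1
    unfold problem9 problem9_alt
    by_cases hr : row = 1
    · subst hr; simp [problem9Go]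
    · simp [problem9Go, hr]
  · -- 2 ≤ column ≤ row
    by_cases heq : row = column
    · subst heq
      have hA := goEq (row.toNat - 1) row.toNat (row.toNat + 1) (by omega) (by omega) (by omega)
      have e1 : (((row.toNat - 1 : Nat) : Int)) + 1 = row := by omega
      have e2 : ((row.toNat : Nat) : Int) = row := by omega
      rw [e1, e2] at hA
      have hlast : (rowStep^[row.toNat - 1] ([1] : List Int)).getD (row.toNat - 1) 0 = 2 := by
        obtain ⟨m, hm⟩ : ∃ m, row.toNat - 1 = m + 1 := ⟨row.toNat - 2, by omega⟩
        rw [hm, Function.iterate_succ_apply']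
        have hl := rowStep_getD_last (rowStep^[m] ([1] : List Int)) (by rw [length_rows]; omega)
        rw [length_rows] at hl
        simpa using hl
      unfold problem9 problem9_alt
      rw [if_neg (by omega), if_pos rfl, hA]
      simpa using hlast
    · -- 2 ≤ column < row
      have hlt : column < row := by omega
      set n : Nat := (row - 1).toNat with hn
      set c : Nat := column.toNat with hc
      have hrow : row = (n : Int) + 1 := by omega
      have hcol : column = (c : Int) := by omega
      have hA : problem9 row column = (rowStep^[n] ([1] : List Int)).getD (c - 1) 0 := by
        unfold problem9
        rw [hrow, hcol]
        exact goEq n c ((((n : Int) + 1).toNat) + 1) (by omega) (by omega) (by omega)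
      rw [hA]
      unfold problem9_alt
      rw [if_neg (by omega), if_neg heq]
      simp only []
      rw [foldl_const_rowStep, PySem.List.length_pyRange_one]
      have hsteps : ((row + 1) - 2).toNat = n := by omega
      rw [hsteps]
      have hidx : 0 ≤ column - 1 := by omega
      have hidx2 : (column - 1) < ((rowStep^[n] ([1] : List Int)).length : Int) := by
        rw [length_rows]; omega
      rw [PySem.List.pyGet?_eq_some_getElem _ hidx hidx2]
      simp only [Option.getD_some]
      rw [List.getD_eq_getElem _ _ (by rw [length_rows]; omega)]
      congr 1
      omega
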